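-- pv_equiv track=rewrite | github.com/KennethLG/Tasks-Solved | huffman.py | findMins
-- ===== SOURCE A (Python) =====
-- def findMins(arr):
--   lisTemp = arr.copy()
--   a = lisTemp[0]
--   for i in range(len(lisTemp)):
--     if a[1] > lisTemp[i][1]:
--       a = lisTemp[i]
--   lisTemp.remove(a)
--   b = lisTemp[0]
--   for i in range(len(lisTemp)):
--     if b[1] > lisTemp[i][1]:
--       b = lisTemp[i]
--   return [a,b]
-- ===== SOURCE B (Python) =====
-- def findMins(arr):
--   s = sorted(arr, key=lambda e: e[1])
--   return [s[0], s[1]]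
-- ===== Notes on version B (the rewrite author's own statement) =====
-- stated objective: simpler
-- what changed: Replaces the two explicit min-scan loops plus list.remove with one stable sort by the second component and taking its first two elements.
import Mathlib
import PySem

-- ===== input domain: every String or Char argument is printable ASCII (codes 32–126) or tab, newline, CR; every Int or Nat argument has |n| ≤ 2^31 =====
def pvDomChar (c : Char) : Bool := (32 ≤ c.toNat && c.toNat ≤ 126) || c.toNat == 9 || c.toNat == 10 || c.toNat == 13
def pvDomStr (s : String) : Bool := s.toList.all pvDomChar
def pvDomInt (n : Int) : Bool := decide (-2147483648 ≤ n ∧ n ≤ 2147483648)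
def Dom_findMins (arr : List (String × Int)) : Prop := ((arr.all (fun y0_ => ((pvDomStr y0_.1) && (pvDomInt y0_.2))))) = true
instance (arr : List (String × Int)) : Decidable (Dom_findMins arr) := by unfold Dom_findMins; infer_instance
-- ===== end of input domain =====

-- B replaces A's two min-scan loops plus list.remove by one stable sort on the second
-- component, returning the sorted list's first two elements (objective: simpler).


-- ===== PORT A =====
-- A's loop body: replace the running minimum when a strictly smaller value is seen
def pvStep (a e : String × Int) : String × Int := if a.2 > e.2 then e else a

def findMins (arr : List (String × Int)) : List (String × Int) :=
  match arr with
  | [] => []                                   -- lisTemp[0] raises IndexError; excluded by Pre_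
  | x :: _ =>
    let a := arr.foldl pvStep x                -- for i in range(len(lisTemp)): …
    match PySem.List.remove? arr a with
    | none => []                               -- unreachable: a ∈ arr
    | some rest =>
      match rest with
      | [] => []                               -- lisTemp[0] raises IndexError; excluded by Pre_
      | y :: _ =>
        let b := rest.foldl pvStep y           -- for i in range(len(lisTemp)): …
        [a, b]

-- ===== PORT B =====
def findMins_alt (arr : List (String × Int)) : List (String × Int) :=
  match PySem.List.sorted arr (fun e => e.2) false with
  | x :: y :: _ => [x, y]
  | _ => []                                    -- s[0]/s[1] raises IndexError; excluded by Pre_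

-- ===== PRECONDITION & SPEC =====
-- Pre_ excludes exactly the inputs of length < 2, on which A raises IndexError (and B does too).
def Pre_findMins (arr : List (String × Int)) : Prop := 2 ≤ arr.length
instance (arr : List (String × Int)) : Decidable (Pre_findMins arr) := by unfold Pre_findMins; infer_instance
def pvWitness_findMins : (List (String × Int)) := [("a", 1), ("b", 0)]

def Spec_findMins (arr : List (String × Int)) (out : List (String × Int)) : Prop := out = findMins_alt arr
instance (arr : List (String × Int)) (out : List (String × Int)) : Decidable (Spec_findMins arr out) := by unfold Spec_findMins; infer_instance

-- ===== CLAIM (what is proved, stated in full; the proofs are below) =====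
def Claim_equal_findMins : Prop := ∀ (arr : List (String × Int)), Dom_findMins arr → Pre_findMins arr → Spec_findMins arr (findMins arr)

-- ===== LEMMAS AND PROOFS =====

theorem pvStep_self (x : String × Int) : pvStep x x = x := by
  simp [pvStep]

theorem foldl_pvStep_cons_self (x : String × Int) (xs : List (String × Int)) :
    List.foldl pvStep x (x :: xs) = List.foldl pvStep x xs := by
  simp [List.foldl_cons, pvStep_self]

-- the running minimum is ≤ the start and every scanned element
theorem fmin_le (xs : List (String × Int)) (x : String × Int) :
    ∀ y ∈ x :: xs, (List.foldl pvStep x xs).2 ≤ y.2 := by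
  induction xs generalizing x with
  | nil => intro y hy; simp at hy; simp [hy]
  | cons e t ih =>
    intro y hy
    have hstep : (pvStep x e).2 ≤ x.2 ∧ (pvStep x e).2 ≤ e.2 := by
      unfold pvStep; split_ifs with h <;> omega
    rcases List.mem_cons.mp hy with h' | hy'
    · rw [h']; exact le_trans (ih (pvStep x e) _ (List.mem_cons_self ..)) hstep.1
    · rcases List.mem_cons.mp hy' with h'' | hy''
      · rw [h'']; exact le_trans (ih (pvStep x e) _ (List.mem_cons_self ..)) hstep.2
      · exact ih (pvStep x e) _ (List.mem_cons_of_mem _ hy'')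

theorem remove?_cons (y : String × Int) (l : List (String × Int)) (v : String × Int) :
    PySem.List.remove? (y :: l) v =
      if y == v then some l else (PySem.List.remove? l v).map (y :: ·) := by
  simp [PySem.List.remove?, List.idxOf?_cons]
  split_ifs with h
  · simp [h]
  · simp [Option.map_map]
    cases List.idxOf? v l <;> simp [Function.comp]

theorem remove?_append_last (l : List (String × Int)) (v : String × Int)
    (h : ∀ y ∈ l, ¬ y = v) : PySem.List.remove? (l ++ [v]) v = some l := by
  induction l with
  | nil => simp
  | cons y t ih =>
    have hy : (y == v) = false := by
      simp [h y (List.mem_cons_self ..)]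
    simp only [List.cons_append, remove?_cons, hy]
    simp [ih (fun z hz => h z (List.mem_cons_of_mem _ hz))]

theorem remove?_append (l r : List (String × Int)) (v z : String × Int)
    (h : PySem.List.remove? l v = some r) :
    PySem.List.remove? (l ++ [z]) v = some (r ++ [z]) := by
  induction l generalizing r with
  | nil => simp [PySem.List.remove?] at h
  | cons y t ih =>
    rw [remove?_cons] at h
    by_cases hy : (y == v) = true
    · simp [hy] at h
      simp [List.cons_append, remove?_cons, hy, ← h]
    · simp [hy] at h
      obtain ⟨r', hr', rfl⟩ := h
      simp [List.cons_append, remove?_cons, hy, ih r' hr']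

theorem remove?_length (l r : List (String × Int)) (v : String × Int)
    (h : PySem.List.remove? l v = some r) : r.length + 1 = l.length := by
  induction l generalizing r with
  | nil => simp [PySem.List.remove?] at h
  | cons y t ih =>
    rw [remove?_cons] at h
    by_cases hy : (y == v) = true
    · simp [hy] at h; simp [← h]
    · simp [hy] at h
      obtain ⟨r', hr', rfl⟩ := h
      simp [ih r' hr']

theorem sorted_append_one (l : List (String × Int)) (z : String × Int) :
    PySem.List.sorted (l ++ [z]) (fun e => e.2) false =
      PySem.List.insertBy (fun a b => decide (a.2 < b.2)) z
        (PySem.List.sorted l (fun e => e.2) false) := by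
  rw [PySem.List.sorted_eq_foldl_insertBy, PySem.List.sorted_eq_foldl_insertBy,
    List.foldl_append]
  rfl

theorem insertBy_cons (bf : (String × Int) → (String × Int) → Bool)
    (z m : String × Int) (t : List (String × Int)) :
    PySem.List.insertBy bf z (m :: t) =
      if bf z m then z :: m :: t else m :: PySem.List.insertBy bf z t := by
  rfl

-- selection characterisation of the stable sort: its head is A's first minimum,
-- and its tail is the stable sort of the list with that element removed
theorem sel (x : String × Int) (xs : List (String × Int)) :
    ∃ r, PySem.List.remove? (x :: xs) (List.foldl pvStep x xs) = some r ∧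
      PySem.List.sorted (x :: xs) (fun e => e.2) false =
        List.foldl pvStep x xs :: PySem.List.sorted r (fun e => e.2) false := by
  induction xs using List.reverseRecOn with
  | nil =>
    refine ⟨[], ?_, ?_⟩
    · simp
    · simp [PySem.List.sorted, PySem.List.insertBy]
  | append_singleton l z ih =>
    obtain ⟨r, hr, hs⟩ := ih
    have hm : List.foldl pvStep x (l ++ [z]) = pvStep (List.foldl pvStep x l) z := by
      simp [List.foldl_append]
    by_cases h : (List.foldl pvStep x l).2 > z.2
    · -- strictly smaller new element: it becomes the minimum
      have hm' : List.foldl pvStep x (l ++ [z]) = z := by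
        simp [hm, pvStep, h]
      refine ⟨x :: l, ?_, ?_⟩
      · rw [show x :: (l ++ [z]) = (x :: l) ++ [z] from rfl, hm']
        refine remove?_append_last _ _ (fun y hy hne => ?_)
        have := fmin_le l x y hy
        subst hne; omega
      · rw [show x :: (l ++ [z]) = (x :: l) ++ [z] from rfl, sorted_append_one, hm', hs,
          insertBy_cons]
        have : (decide (z.2 < (List.foldl pvStep x l).2)) = true := by simpa using h
        rw [this, if_pos rfl, ← hs]
    · -- minimum unchanged
      have hm' : List.foldl pvStep x (l ++ [z]) = List.foldl pvStep x l := by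
        simp [hm, pvStep, h]
      refine ⟨r ++ [z], ?_, ?_⟩
      · rw [show x :: (l ++ [z]) = (x :: l) ++ [z] from rfl, hm']
        exact remove?_append _ _ _ _ hr
      · rw [show x :: (l ++ [z]) = (x :: l) ++ [z] from rfl, sorted_append_one, hm', hs,
          insertBy_cons]
        have : (decide (z.2 < (List.foldl pvStep x l).2)) = false := by simpa using h
        rw [this, if_neg (by simp), sorted_append_one]

-- ===== VERDICT (by name: the statement is the Claim_ definition above) =====
theorem findMins_spec : Claim_equal_findMins := by
  intro arr _ hpre
  unfold Spec_findMins
  cases arr with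
  | nil => simp [Pre_findMins] at hpre
  | cons x xs =>
    obtain ⟨r, hr, hs⟩ := sel x xs
    have hlen : 2 ≤ xs.length + 1 := by simpa [Pre_findMins] using hpre
    have hrlen := remove?_length _ _ _ hr
    cases r with
    | nil => rw [List.length_nil, List.length_cons] at hrlen; omega
    | cons y ys =>
      obtain ⟨r2, hr2, hs2⟩ := sel y ys
      simp only [findMins, foldl_pvStep_cons_self, hr, findMins_alt, hs, hs2]
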